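-- pv_equiv track=rewrite | github.com/AdrianSuliga/WDI | 06 - Zadania z rekurencji/ex_21.py | rewriteArr
-- ===== SOURCE A (Python) =====
-- def rewriteArr(T, row, col):
--     n = len(T)
--     S = [[0 for _ in range(n - 1)] for _ in range(n - 1)]
--     rIt = 0
--     cIt = 0
--     for i in range(n):
--         for j in range(n):
--             if i != row and j != col:
--                 S[rIt][cIt] = T[i][j]
--                 if cIt == n - 2:
--                     cIt = 0
--                     rIt += 1
--                 else: cIt += 1
--     return S
-- ===== SOURCE B (Python) =====
-- def rewriteArr(T, row, col):
--     n = len(T)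
--     S = [r[:n] for r in T]
--     del S[row]
--     for r in S:
--         del r[col]
--     return S
-- ===== Notes on version B (the rewrite author's own statement) =====
-- stated objective: simpler
-- what changed: Replaces A's preallocated (n-1)x(n-1) grid filled element-by-element through manual rIt/cIt wrap-around counters by copy-then-delete: copy each row's n-column window, then 'del' the unwanted row and, in each remaining row, the unwanted column; Pre_ excludes the inputs (empty matrix, out-of-range row on a 1x1 matrix, ragged kept rows shorter than n) where A happens to return but deleting raises IndexError.
-- outside the precondition, e.g. on rewriteArr([], 0, 0): A returns [], B raises IndexError; on rewriteArr([[5]], 1, 0): A returns [], B raises IndexError; on rewriteArr([[1, 2], [3]], 0, 1): A returns [[3]], B raises IndexError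
import Mathlib
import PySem

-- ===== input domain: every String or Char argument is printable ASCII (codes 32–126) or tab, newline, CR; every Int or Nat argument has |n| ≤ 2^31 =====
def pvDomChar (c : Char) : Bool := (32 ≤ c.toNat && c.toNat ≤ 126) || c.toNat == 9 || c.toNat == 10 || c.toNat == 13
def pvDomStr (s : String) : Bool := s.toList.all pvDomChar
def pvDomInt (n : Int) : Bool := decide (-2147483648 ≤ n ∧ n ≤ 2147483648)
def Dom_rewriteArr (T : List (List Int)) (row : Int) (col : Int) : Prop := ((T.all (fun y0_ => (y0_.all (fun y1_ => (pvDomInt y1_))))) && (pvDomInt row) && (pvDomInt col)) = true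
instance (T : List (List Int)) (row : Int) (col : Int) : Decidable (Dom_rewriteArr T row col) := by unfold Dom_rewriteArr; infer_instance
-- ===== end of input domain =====

-- B replaces A's preallocated grid + wrap-around rIt/cIt element writes by copy-then-delete:
-- copy the n-column window of each row, 'del' the unwanted row and the unwanted column of each
-- remaining row; equivalence is proved on Pre_ (the inputs where A returns and deleting succeeds).

-- ===== PORT A =====
-- the three Python lines 'S[rIt][cIt] = T[i][j]; if cIt == n-2: cIt=0; rIt+=1 else: cIt+=1'
def pvWrite (n : Nat) (st : List (List Int) × Nat × Nat) (v : Int) : List (List Int) × Nat × Nat :=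
  let S' := st.1.set st.2.1 ((st.1.getD st.2.1 []).set st.2.2 v)
  if (st.2.2 : Int) = (n : Int) - 2 then (S', st.2.1 + 1, 0) else (S', st.2.1, st.2.2 + 1)

def rewriteArr (T : List (List Int)) (row : Int) (col : Int) : List (List Int) :=
  let n := T.length
  ((List.range n).foldl (fun st (i : Nat) =>
      (List.range n).foldl (fun st (j : Nat) =>
        if (i : Int) ≠ row ∧ (j : Int) ≠ col then pvWrite n st ((T.getD i []).getD j 0) else st) st)
    ((List.range (n - 1)).map (fun _ => (List.range (n - 1)).map (fun _ => (0 : Int))), 0, 0)).1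

-- ===== PORT B =====
-- 'S = [r[:n] for r in T]; del S[row]; for r in S: del r[col]; return S'
-- (del lst[i] = PySem.List.pop? lst i, dropping the popped element; none = Python's IndexError)
def rewriteArr_alt (T : List (List Int)) (row : Int) (col : Int) : List (List Int) :=
  let n : Int := (T.length : Int)
  let S := T.map (fun r => PySem.List.slice r none (some n))
  match PySem.List.pop? S row with
  | none => []        -- Python raises IndexError here (del S[row]); outside Pre_
  | some (_, S') =>
      S'.map (fun r =>
        match PySem.List.pop? r col with
        | none => r   -- Python raises IndexError here (del r[col]); outside Pre_
        | some (_, r') => r')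

-- ===== PRECONDITION & SPEC =====
-- Pre_: a 1x1 matrix with row = 0, or in-range row/col with every kept row of length ≥ n.
-- It excludes the few degenerate inputs on which A still returns a value but B's deletes
-- naturally raise IndexError: the empty matrix, an out-of-range row on a 1x1 matrix whose
-- single cell is never read (col = 0 or col out of range), and ragged kept rows of length
-- n-1 that A happens to survive only when col = n-1 (the missing last column is never read).
def Pre_rewriteArr (T : List (List Int)) (row : Int) (col : Int) : Prop :=
  (T.length = 1 ∧ row = 0) ∨
    (0 ≤ row ∧ row < T.length ∧ 0 ≤ col ∧ col < T.length ∧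
      ∀ i : Nat, i < T.length → (i : Int) ≠ row → T.length ≤ (T.getD i []).length)
instance (T : List (List Int)) (row : Int) (col : Int) : Decidable (Pre_rewriteArr T row col) := by
  unfold Pre_rewriteArr; infer_instance

def pvWitness_rewriteArr : List (List Int) × Int × Int := ([[1, 2], [3, 4]], 0, 1)

def Spec_rewriteArr (T : List (List Int)) (row : Int) (col : Int) (out : List (List Int)) : Prop := out = rewriteArr_alt T row col
instance (T : List (List Int)) (row : Int) (col : Int) (out : List (List Int)) : Decidable (Spec_rewriteArr T row col out) := by unfold Spec_rewriteArr; infer_instance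

-- ===== CLAIM (what is proved, stated in full; the proofs are below) =====
def Claim_equal_rewriteArr : Prop := ∀ (T : List (List Int)) (row : Int) (col : Int), Dom_rewriteArr T row col → Pre_rewriteArr T row col → Spec_rewriteArr T row col (rewriteArr T row col)

-- ===== LEMMAS AND PROOFS =====

-- a fold that ignores its elements is the identity
theorem pv_foldl_id {a b : Type} (l : List b) (st : a) : l.foldl (fun s _ => s) st = st := by
  induction l generalizing st with
  | nil => rfl
  | cons x xs ih => simp [ih st]

-- setting index c and taking c+1 elements keeps the prefix and the new element
theorem pv_set_take {a : Type} (l : List a) (c : Nat) (v : a) (h : c < l.length) :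
    (l.set c v).take (c + 1) = l.take c ++ [v] := by
  rw [List.set_eq_take_append_cons_drop, if_pos h, List.take_append, List.take_take]
  have h1 : (l.take c).length = c := by simp; omega
  have h2 : min (c + 1) c = c := by omega
  rw [h1, h2]
  simp

-- one full row of writes: from column 0 the wrap-around counter lands on (r+1, 0)
theorem pv_fill_row (n : Nat) (hn : 2 ≤ n) :
    ∀ (vs : List Int) (c : Nat) (S : List (List Int)) (r : Nat),
      vs ≠ [] → c + vs.length = n - 1 → (S.getD r []).length = n - 1 →
      vs.foldl (pvWrite n) (S, r, c) = (S.set r ((S.getD r []).take c ++ vs), r + 1, 0) := by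
  intro vs
  induction vs with
  | nil => intro c S r hne; exact absurd rfl hne
  | cons v vs ih =>
    intro c S r _ hlen hrow
    have hlen' : c + vs.length + 1 = n - 1 := by simp at hlen; omega
    have hrS : r < S.length := by
      by_contra hge
      have hnil : S.getD r [] = [] := List.getD_eq_default _ _ (by omega)
      rw [hnil] at hrow
      simp at hrow
      omega
    have hcl : c < (S.getD r []).length := by rw [hrow]; omega
    rcases List.eq_nil_or_concat' vs with hvs | _
    · subst hvs
      have hc : c = n - 2 := by simp at hlen'; omega
      have hcast : ((c : Nat) : Int) = (n : Int) - 2 := by omega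
      simp only [List.foldl_cons, List.foldl_nil, pvWrite, hcast, if_true]
      have hrowfull : (S.getD r []).set c v = (S.getD r []).take c ++ [v] := by
        have h := pv_set_take (S.getD r []) c v hcl
        rw [← h, List.take_of_length_le (by rw [List.length_set, hrow]; omega)]
      rw [hrowfull]
    · have hvs : vs ≠ [] := by rintro rfl; simp_all
      have hc : c < n - 2 := by
        have := List.length_pos_iff.mpr hvs
        omega
      have hcast : ¬ (((c : Nat) : Int) = (n : Int) - 2) := by omega
      simp only [List.foldl_cons, pvWrite, if_neg hcast]
      set S' := S.set r ((S.getD r []).set c v) with hS'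
      have hgd : S'.getD r [] = (S.getD r []).set c v := by
        rw [hS', List.getD_eq_getElem _ _ (by simpa using hrS), List.getElem_set_self]
      have := ih (c + 1) S' r hvs (by omega) (by rw [hgd, List.length_set]; exact hrow)
      rw [this, hgd, hS', List.set_set, pv_set_take _ _ _ hcl]
      rw [List.append_assoc, List.singleton_append]

-- filling one row of values per element of `rows`, starting at row r, overwrites S[r..r+rows.length)
theorem pv_fill_rows {a : Type} (n : Nat) (hn : 2 ≤ n) (g : a → List Int) :
    ∀ (rows : List a) (S : List (List Int)) (r : Nat),
      (∀ R ∈ rows, (g R).length = n - 1) → (∀ s ∈ S, s.length = n - 1) →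
      r + rows.length ≤ S.length →
      rows.foldl (fun st Ri => (g Ri).foldl (pvWrite n) st) (S, r, 0)
        = (S.take r ++ rows.map g ++ S.drop (r + rows.length), r + rows.length, 0) := by
  intro rows
  induction rows with
  | nil => intro S r _ _ _; simp
  | cons Ri rest ih =>
    intro S r hg hS hle
    have hrS : r < S.length := by simp at hle; omega
    have hgRi : (g Ri).length = n - 1 := hg Ri (by simp)
    have hrow : (S.getD r []).length = n - 1 := by
      rw [List.getD_eq_getElem _ _ hrS]; exact hS _ (by simp)
    simp only [List.foldl_cons]
    rw [pv_fill_row n hn (g Ri) 0 S r (by rw [← List.length_pos_iff, hgRi]; omega)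
          (by omega) hrow]
    simp only [List.take_zero, List.nil_append]
    rw [ih (S.set r (g Ri)) (r + 1)
          (fun R hR => hg R (by simp [hR]))
          (fun s hs => by
            rcases List.mem_or_eq_of_mem_set hs with h | h
            · exact hS s h
            · rw [h]; exact hgRi)
          (by simp at hle ⊢; omega)]
    have h1 : (S.set r (g Ri)).take (r + 1) = S.take r ++ [g Ri] := pv_set_take S r (g Ri) hrS
    have h2 : (S.set r (g Ri)).drop (r + 1 + rest.length) = S.drop (r + 1 + rest.length) := by
      rw [List.drop_set, if_pos (by omega)]
    rw [h1, h2]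
    have h3 : r + 1 + rest.length = r + (Ri :: rest).length := by simp; omega
    rw [h3]
    simp

-- range n with one value m removed, as a concatenation
theorem pv_range_filter (n m : Nat) (hm : m < n) :
    (List.range n).filter (fun (j : Nat) => decide ((j : Int) ≠ (m : Int)))
      = List.range m ++ List.range' (m + 1) (n - m - 1) := by
  have h1 : List.range' 0 m ++ List.range' m 1 = List.range' 0 (m + 1) := by
    have h := List.range'_append (s := 0) (m := m) (n := 1) (step := 1)
    simpa using h
  have h2 : List.range' 0 (m + 1) ++ List.range' (m + 1) (n - m - 1) = List.range' 0 n := by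
    have h := List.range'_append (s := 0) (m := m + 1) (n := n - m - 1) (step := 1)
    simp at h
    rw [h]
    congr 1
    omega
  have hsplit : List.range n = (List.range' 0 m ++ List.range' m 1) ++ List.range' (m + 1) (n - m - 1) := by
    rw [List.range_eq_range', ← h2, ← h1]
  have e1 : (List.range' 0 m).filter (fun (j : Nat) => decide ((j : Int) ≠ (m : Int))) = List.range' 0 m := by
    rw [List.filter_eq_self]
    intro a ha
    rw [List.mem_range'_1] at ha
    simp only [decide_eq_true_eq]
    omega
  have e2 : ([m] : List Nat).filter (fun (j : Nat) => decide ((j : Int) ≠ (m : Int))) = [] := by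
    simp
  have e3 : (List.range' (m + 1) (n - m - 1)).filter (fun (j : Nat) => decide ((j : Int) ≠ (m : Int)))
      = List.range' (m + 1) (n - m - 1) := by
    rw [List.filter_eq_self]
    intro a ha
    rw [List.mem_range'_1] at ha
    simp only [decide_eq_true_eq]
    omega
  rw [hsplit, List.filter_append, List.filter_append, List.range'_one, e1, e2, e3]
  simp [List.range_eq_range']

-- mapping getD over a block of indices is drop-then-take
theorem pv_map_getD_range' {a : Type} (T : List a) (d : a) :
    ∀ (k s : Nat), s + k ≤ T.length →
      (List.range' s k).map (fun i => T.getD i d) = (T.drop s).take k := by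
  intro k
  induction k with
  | zero => intro s _; simp
  | succ k ih =>
    intro s h
    have hs : s < T.length := by omega
    rw [List.range'_succ, List.map_cons, ih (s + 1) (by omega)]
    rw [List.drop_eq_getElem_cons hs, List.take_succ_cons, List.getD_eq_getElem _ _ hs]

-- one kept row: filtered-index copy of r equals r[:cn] ++ r[cn+1:n]
theorem pv_inner_slice (n cn : Nat) (r : List Int) (hcn : cn < n) (hlen : n ≤ r.length) :
    ((List.range n).filter (fun (j : Nat) => decide ((j : Int) ≠ (cn : Int)))).map
        (fun j => r.getD j 0)
      = r.take cn ++ (r.drop (cn + 1)).take (n - (cn + 1)) := by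
  rw [pv_range_filter n cn hcn, List.map_append]
  have h1 : (List.range cn).map (fun j => r.getD j 0) = r.take cn := by
    rw [List.range_eq_range']
    have := pv_map_getD_range' r 0 cn 0 (by omega)
    simpa using this
  rw [h1, pv_map_getD_range' r 0 (n - cn - 1) (cn + 1) (by omega)]
  have he : n - cn - 1 = n - (cn + 1) := by omega
  rw [he]

-- deleting column cn from the n-column window of r is the filtered-index copy of r
theorem pv_pop_row (n cn : Nat) (r : List Int) (hcn : cn < n) (hlen : n ≤ r.length) :
    (match PySem.List.pop? (r.take n) ((cn : Nat) : Int) with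
     | none => r.take n
     | some (_, r') => r')
      = ((List.range n).filter (fun (j : Nat) => decide ((j : Int) ≠ (cn : Int)))).map
          (fun j => r.getD j 0) := by
  have hl : cn < (r.take n).length := by
    rw [List.length_take]
    omega
  rw [PySem.List.pop?_natCast (r.take n) cn hl]
  show (r.take n).eraseIdx cn = _
  rw [pv_inner_slice n cn r hcn hlen, List.eraseIdx_eq_take_drop_succ, List.take_take,
      List.drop_take]
  have hm : min cn n = cn := by omega
  rw [hm]

-- ===== VERDICT (by name: the statement is the Claim_ definition above) =====
theorem rewriteArr_spec : Claim_equal_rewriteArr := by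
  intro T row col _ hpre
  unfold Spec_rewriteArr
  rcases hpre with ⟨h1, rfl⟩ | ⟨hr0, hrow, hc0, hcol, hkept⟩
  · obtain ⟨t, rfl⟩ : ∃ t, T = [t] := List.length_eq_one_iff.mp h1
    simp [rewriteArr, rewriteArr_alt, List.range_succ, PySem.List.pop?_zero_cons]
  · obtain ⟨rn, rfl⟩ : ∃ rn : Nat, row = (rn : Int) := ⟨row.toNat, (Int.toNat_of_nonneg hr0).symm⟩
    obtain ⟨cn, rfl⟩ : ∃ cn : Nat, col = (cn : Int) := ⟨col.toNat, (Int.toNat_of_nonneg hc0).symm⟩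
    have hrn : rn < T.length := by exact_mod_cast hrow
    have hcn : cn < T.length := by exact_mod_cast hcol
    by_cases hn2 : 2 ≤ T.length
    case neg =>
      obtain ⟨t, rfl⟩ : ∃ t, T = [t] := List.length_eq_one_iff.mp (by omega)
      have hrn0 : rn = 0 := by omega
      have hcn0 : cn = 0 := by omega
      subst hrn0
      subst hcn0
      simp [rewriteArr, rewriteArr_alt, List.range_succ, PySem.List.pop?_zero_cons]
    case pos =>
    -- B in closed form: the kept rows, each the kept values of its row of T
    have hB : rewriteArr_alt T (rn : Int) (cn : Int)
        = ((List.range T.length).filter (fun (i : Nat) => decide ((i : Int) ≠ (rn : Int)))).map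
            (fun i => ((List.range T.length).filter (fun (j : Nat) => decide ((j : Int) ≠ (cn : Int)))).map
              (fun j => (T.getD i []).getD j 0)) := by
      unfold rewriteArr_alt
      simp only [PySem.List.slice_to_natCast]
      have hSlen : rn < (T.map (fun r => List.take T.length r)).length := by
        rw [List.length_map]
        exact hrn
      rw [PySem.List.pop?_natCast _ rn hSlen]
      show (((T.map (fun r => List.take T.length r)).eraseIdx rn).map _ : List (List Int)) = _
      rw [List.eraseIdx_eq_take_drop_succ, ← List.map_take, ← List.map_drop, ← List.map_append,
          List.map_map]
      -- the kept-rows list equals the filtered-index rows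
      have hrows : T.take rn ++ T.drop (rn + 1)
          = ((List.range T.length).filter (fun (i : Nat) => decide ((i : Int) ≠ (rn : Int)))).map
              (fun i => T.getD i []) := by
        rw [pv_range_filter T.length rn hrn, List.map_append]
        have h1 : (List.range rn).map (fun i => T.getD i []) = T.take rn := by
          rw [List.range_eq_range']
          have := pv_map_getD_range' T [] rn 0 (by omega)
          simpa using this
        rw [h1, pv_map_getD_range' T [] (T.length - rn - 1) (rn + 1) (by omega)]
        have hd : (T.drop (rn + 1)).take (T.length - rn - 1) = T.drop (rn + 1) :=
          List.take_of_length_le (by rw [List.length_drop]; omega)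
        rw [hd]
      rw [hrows, List.map_map]
      refine List.map_congr_left (fun i hi => ?_)
      have hi' := List.mem_filter.mp hi
      have hin : i < T.length := List.mem_range.mp hi'.1
      have hir : (i : Int) ≠ (rn : Int) := by simpa using hi'.2
      have hlen := hkept i hin hir
      simp only [Function.comp]
      exact pv_pop_row T.length cn (T.getD i []) hcn hlen
    rw [hB]
    -- A side
    simp only [rewriteArr]
    have hcong : ∀ (st : List (List Int) × Nat × Nat), ∀ i ∈ List.range T.length,
        (List.range T.length).foldl (fun st (j : Nat) =>
            if (i : Int) ≠ (rn : Int) ∧ (j : Int) ≠ (cn : Int) then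
              pvWrite T.length st ((T.getD i []).getD j 0) else st) st
          = (if (fun (i : Nat) => decide ((i : Int) ≠ (rn : Int))) i = true then
              (fun st (i : Nat) =>
                (((List.range T.length).filter (fun (j : Nat) => decide ((j : Int) ≠ (cn : Int)))).map
                  (fun j => (T.getD i []).getD j 0)).foldl (pvWrite T.length) st) st i
            else st) := by
      intro st i _
      by_cases hir : (i : Int) = (rn : Int)
      · rw [if_neg (by simp [hir])]
        have hfun : (fun (st' : List (List Int) × Nat × Nat) (j : Nat) =>
            if (i : Int) ≠ (rn : Int) ∧ (j : Int) ≠ (cn : Int) then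
              pvWrite T.length st' ((T.getD i []).getD j 0) else st')
            = fun st' _ => st' := by
          funext st' j
          rw [if_neg (by simp [hir])]
        rw [hfun, pv_foldl_id]
      · rw [if_pos (by simpa using hir)]
        have hfun : (fun (st' : List (List Int) × Nat × Nat) (j : Nat) =>
            if (i : Int) ≠ (rn : Int) ∧ (j : Int) ≠ (cn : Int) then
              pvWrite T.length st' ((T.getD i []).getD j 0) else st')
            = fun st' (j : Nat) =>
                if (fun (j : Nat) => decide ((j : Int) ≠ (cn : Int))) j = true then
                  (fun st' (j : Nat) => pvWrite T.length st' ((T.getD i []).getD j 0)) st' j else st' := by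
          funext st' j
          by_cases hj : (j : Int) = (cn : Int) <;> simp [hir, hj]
        rw [hfun, ← List.foldl_filter,
            ← List.foldl_map (f := fun (j : Nat) => (T.getD i []).getD j 0) (g := pvWrite T.length)]
    rw [PySem.List.foldl_congr_mem _ _ _ _ hcong, ← List.foldl_filter]
    have hvlen : ∀ i : Nat,
        (((List.range T.length).filter (fun (j : Nat) => decide ((j : Int) ≠ (cn : Int)))).map
          (fun j => (T.getD i []).getD j 0)).length = T.length - 1 := by
      intro i
      rw [List.length_map, pv_range_filter T.length cn hcn]
      simp
      omega
    have hklen : ((List.range T.length).filter (fun (i : Nat) => decide ((i : Int) ≠ (rn : Int)))).length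
        = T.length - 1 := by
      rw [pv_range_filter T.length rn hrn]
      simp
      omega
    rw [pv_fill_rows T.length hn2
          (fun i => ((List.range T.length).filter (fun (j : Nat) => decide ((j : Int) ≠ (cn : Int)))).map
            (fun j => (T.getD i []).getD j 0))
          ((List.range T.length).filter (fun (i : Nat) => decide ((i : Int) ≠ (rn : Int)))) _ 0
          (fun i _ => hvlen i)
          (fun s hs => by
            rcases List.mem_map.mp hs with ⟨_, _, rfl⟩
            simp)
          (by rw [hklen]; simp)]
    simp only [List.take_zero, List.nil_append, Nat.zero_add]
    have hS0 : List.drop ((List.range T.length).filter (fun (i : Nat) => decide ((i : Int) ≠ (rn : Int)))).length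
        (List.map (fun _ => List.map (fun _ => (0 : Int)) (List.range (T.length - 1)))
          (List.range (T.length - 1))) = ([] : List (List Int)) := by
      apply List.drop_of_length_le
      rw [hklen]
      simp
    rw [hS0, List.append_nil]
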